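-- pv_equiv track=rewrite | github.com/simranmahindrakar/DAA-things | hop hope hop.py | onehop
-- ===== SOURCE A (Python) =====
-- def onehop(l):
--   hopstop=[]
--
--   for i in l :
--     for j in range(len(l)):
--      if i[0]==l[j][1] and i[0] not in hopstop:
--         hopstop.append(i[0])
--         break
--
--
--   r=[]
--   for i in hopstop:
--     for j in l :
--       if j[0]==i:
--         for k in l:
--           if k[1]==i and j[1]!=k[0] and (k[0],j[1]) not in r:
--             r.append((k[0],j[1]))
--
--
--   return (sorted(r))
-- ===== SOURCE B (Python) =====
-- def onehop(l):
--     succ = {}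
--     pred = {}
--     for a, b in l:
--         succ.setdefault(a, set()).add(b)
--         pred.setdefault(b, set()).add(a)
--     out = set()
--     for m in succ:
--         if m in pred:
--             for a in pred[m]:
--                 for b in succ[m]:
--                     if a != b:
--                         out.add((a, b))
--     return sorted(out)
-- ===== Notes on version B (the rewrite author's own statement) =====
-- stated objective: faster
-- what changed: replaces the quadratic intermediate-node scan and the triple nested list scans with membership tests by predecessor/successor dicts of sets built in one pass, a per-node product into a set, and a final sort
import Mathlib
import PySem

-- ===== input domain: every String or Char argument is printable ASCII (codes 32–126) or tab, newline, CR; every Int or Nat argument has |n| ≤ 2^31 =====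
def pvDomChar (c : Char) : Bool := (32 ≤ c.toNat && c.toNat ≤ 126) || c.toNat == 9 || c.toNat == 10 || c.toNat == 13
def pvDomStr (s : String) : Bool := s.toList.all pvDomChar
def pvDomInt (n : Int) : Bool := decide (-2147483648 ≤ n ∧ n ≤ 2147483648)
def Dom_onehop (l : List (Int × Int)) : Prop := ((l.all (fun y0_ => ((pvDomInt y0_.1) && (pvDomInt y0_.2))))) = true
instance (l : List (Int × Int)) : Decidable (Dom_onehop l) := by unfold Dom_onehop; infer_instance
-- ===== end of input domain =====

-- B indexes edges by source and by target in dicts of sets built in one pass and takes per-node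
-- products into a set, replacing A's nested list scans; same return value, measured faster.

-- ===== PORT A =====
-- 'for j in range(len(l)): if i[0]==l[j][1] and i[0] not in hopstop: append; break' —
-- j is only used as l[j], so the indexed scan is transcribed as a structural scan of l
-- in the same order with the same break (exact: same elements visited, same condition).
def onehopScan (i0 : Int) (hs : List Int) : List (Int × Int) → List Int
  | [] => hs
  | e :: rest =>
      if i0 == e.2 && !(hs.contains i0) then hs ++ [i0] else onehopScan i0 hs rest

def onehopHopstop (l : List (Int × Int)) : List Int :=
  l.foldl (fun hs i => onehopScan i.1 hs l) []

def onehopR (l : List (Int × Int)) : List (Int × Int) :=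
  (onehopHopstop l).foldl (fun r i =>
    l.foldl (fun r j =>
      if j.1 == i then
        l.foldl (fun r k =>
          if k.2 == i && j.2 != k.1 && !(r.contains (k.1, j.2)) then r ++ [(k.1, j.2)] else r) r
      else r) r) []

def onehop (l : List (Int × Int)) : List (Int × Int) :=
  PySem.List.sorted2 (onehopR l) Prod.fst Prod.snd

-- ===== PORT B =====
-- one pass over l building succ (keyed by source) and pred (keyed by target);
-- 'd.setdefault(x, set()).add(y)' is 'insert x ((getD x ∅).add y)' (same key position, same set)
def altDicts (l : List (Int × Int)) :
    PySem.Dict Int (PySem.Set Int) × PySem.Dict Int (PySem.Set Int) :=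
  l.foldl (fun sp e =>
      (sp.1.insert e.1 (PySem.Set.add (sp.1.getD e.1 PySem.Set.empty) e.2),
       sp.2.insert e.2 (PySem.Set.add (sp.2.getD e.2 PySem.Set.empty) e.1)))
    (PySem.Dict.empty, PySem.Dict.empty)

def altOut (l : List (Int × Int)) : PySem.Set (Int × Int) :=
  let succ := (altDicts l).1
  let pred := (altDicts l).2
  succ.keys.foldl (fun out m =>
    if pred.contains m then
      (pred.getD m PySem.Set.empty).foldl (fun out a =>
        (succ.getD m PySem.Set.empty).foldl (fun out b =>
          if a != b then PySem.Set.add out (a, b) else out) out) out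
    else out) PySem.Set.empty

def onehop_alt (l : List (Int × Int)) : List (Int × Int) :=
  PySem.List.sorted2 (altOut l) Prod.fst Prod.snd

-- ===== PRECONDITION & SPEC =====
def Spec_onehop (l : List (Int × Int)) (out : List (Int × Int)) : Prop := out = onehop_alt l
instance (l : List (Int × Int)) (out : List (Int × Int)) : Decidable (Spec_onehop l out) := by unfold Spec_onehop; infer_instance

-- ===== CLAIM (what is proved, stated in full; the proofs are below) =====
def Claim_equal_onehop : Prop := ∀ (l : List (Int × Int)), Dom_onehop l → Spec_onehop l (onehop l)

-- ===== LEMMAS AND PROOFS =====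

-- generic foldl lemmas
theorem foldl_mem_iff {α β : Type} (step : List α → β → List α) (Q : β → Prop) (p : α)
    (h : ∀ r e, p ∈ step r e ↔ p ∈ r ∨ Q e) :
    ∀ (xs : List β) (r : List α), p ∈ xs.foldl step r ↔ p ∈ r ∨ ∃ e ∈ xs, Q e := by
  intro xs
  induction xs with
  | nil => intro r; simp
  | cons e rest ih =>
      intro r
      simp only [List.foldl_cons, ih, h, List.mem_cons]
      constructor
      · rintro ((hp | hq) | ⟨e', he', hq⟩)
        · exact Or.inl hp
        · exact Or.inr ⟨e, Or.inl rfl, hq⟩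
        · exact Or.inr ⟨e', Or.inr he', hq⟩
      · rintro (hp | ⟨e', (rfl | he'), hq⟩)
        · exact Or.inl (Or.inl hp)
        · exact Or.inl (Or.inr hq)
        · exact Or.inr ⟨e', he', hq⟩

theorem foldl_nodup {α β : Type} (step : List α → β → List α)
    (h : ∀ r e, r.Nodup → (step r e).Nodup) :
    ∀ (xs : List β) (r : List α), r.Nodup → (xs.foldl step r).Nodup := by
  intro xs
  induction xs with
  | nil => intro r hr; simpa
  | cons e rest ih => intro r hr; exact ih _ (h r e hr)

-- ===== A-side characterisation =====
theorem mem_onehopScan (i0 m : Int) (l : List (Int × Int)) (hs : List Int) :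
    m ∈ onehopScan i0 hs l ↔ m ∈ hs ∨ (m = i0 ∧ ∃ e ∈ l, i0 = e.2) := by
  induction l with
  | nil => simp [onehopScan]
  | cons e rest ih =>
      simp only [onehopScan, List.mem_cons]
      by_cases h1 : i0 = e.2
      · by_cases h2 : i0 ∈ hs
        · rw [if_neg (by simp [h2]), ih]
          constructor
          · rintro (h | ⟨rfl, f, hf, hv⟩)
            · exact Or.inl h
            · exact Or.inr ⟨rfl, f, Or.inr hf, hv⟩
          · rintro (h | ⟨rfl, f, hf, hv⟩)
            · exact Or.inl h
            · exact Or.inl h2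
        · rw [if_pos (by subst h1; simp [h2])]
          simp only [List.mem_append, List.mem_singleton]
          constructor
          · rintro (h | rfl)
            · exact Or.inl h
            · exact Or.inr ⟨rfl, e, Or.inl rfl, h1⟩
          · rintro (h | ⟨rfl, _⟩)
            · exact Or.inl h
            · exact Or.inr rfl
      · rw [if_neg (by simp [h1]), ih]
        constructor
        · rintro (h | ⟨rfl, f, hf, hv⟩)
          · exact Or.inl h
          · exact Or.inr ⟨rfl, f, Or.inr hf, hv⟩
        · rintro (h | ⟨rfl, f, rfl | hf, hv⟩)
          · exact Or.inl h
          · exact absurd hv h1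
          · exact Or.inr ⟨rfl, f, hf, hv⟩

theorem mem_onehopHopstop (l : List (Int × Int)) (m : Int) :
    m ∈ onehopHopstop l ↔ ∃ i ∈ l, m = i.1 ∧ ∃ e ∈ l, i.1 = e.2 := by
  have h := foldl_mem_iff (fun hs i => onehopScan i.1 hs l)
    (fun i => m = i.1 ∧ ∃ e ∈ l, i.1 = e.2) m
    (fun r e => mem_onehopScan e.1 m l r) l []
  simpa [onehopHopstop] using h

theorem memA_inner (i : Int) (j : Int × Int) (r : List (Int × Int)) (k : Int × Int) (p : Int × Int) :
    (p ∈ if k.2 == i && j.2 != k.1 && !(r.contains (k.1, j.2)) then r ++ [(k.1, j.2)] else r) ↔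
      p ∈ r ∨ (k.2 = i ∧ j.2 ≠ k.1 ∧ p = (k.1, j.2)) := by
  by_cases h1 : k.2 = i
  · by_cases h2 : j.2 = k.1
    · simp [h1, h2]
    · by_cases h3 : (k.1, j.2) ∈ r
      · rw [if_neg (by simp [h3])]
        constructor
        · exact Or.inl
        · rintro (h | ⟨_, _, rfl⟩)
          · exact h
          · exact h3
      · rw [if_pos (by simp [h1, h2, h3])]
        simp only [List.mem_append, List.mem_singleton]
        constructor
        · rintro (h | rfl)
          · exact Or.inl h
          · exact Or.inr ⟨h1, h2, rfl⟩
        · rintro (h | ⟨_, _, rfl⟩)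
          · exact Or.inl h
          · exact Or.inr rfl
  · simp [h1]

theorem memA_mid (l : List (Int × Int)) (i : Int) (j : Int × Int) (r : List (Int × Int)) (p : Int × Int) :
    (p ∈ if j.1 == i then
        l.foldl (fun r k =>
          if k.2 == i && j.2 != k.1 && !(r.contains (k.1, j.2)) then r ++ [(k.1, j.2)] else r) r
      else r) ↔
      p ∈ r ∨ (j.1 = i ∧ ∃ k ∈ l, k.2 = i ∧ j.2 ≠ k.1 ∧ p = (k.1, j.2)) := by
  by_cases h : j.1 = i
  · rw [if_pos (by simp [h])]
    rw [foldl_mem_iff _ (fun k => k.2 = i ∧ j.2 ≠ k.1 ∧ p = (k.1, j.2)) p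
        (fun r k => memA_inner i j r k p) l r]
    simp [h]
  · simp [h]

theorem mem_onehopR (l : List (Int × Int)) (p : Int × Int) :
    p ∈ onehopR l ↔ ∃ j ∈ l, ∃ k ∈ l, k.2 = j.1 ∧ j.2 ≠ k.1 ∧ p = (k.1, j.2) := by
  unfold onehopR
  rw [foldl_mem_iff _
      (fun i => ∃ j ∈ l, j.1 = i ∧ ∃ k ∈ l, k.2 = i ∧ j.2 ≠ k.1 ∧ p = (k.1, j.2)) p
      (fun r i => by
        rw [foldl_mem_iff _
            (fun j => j.1 = i ∧ ∃ k ∈ l, k.2 = i ∧ j.2 ≠ k.1 ∧ p = (k.1, j.2)) p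
            (fun r j => memA_mid l i j r p) l r]) (onehopHopstop l) []]
  simp only [List.not_mem_nil, false_or]
  constructor
  · rintro ⟨i, _, j, hj, rfl, k, hk, hki, hne, rfl⟩
    exact ⟨j, hj, k, hk, hki, hne, rfl⟩
  · rintro ⟨j, hj, k, hk, hki, hne, rfl⟩
    refine ⟨j.1, ?_, j, hj, rfl, k, hk, hki, hne, rfl⟩
    exact (mem_onehopHopstop l j.1).2 ⟨j, hj, rfl, k, hk, hki.symm⟩

theorem nodup_onehopR (l : List (Int × Int)) : (onehopR l).Nodup := by
  unfold onehopR
  refine foldl_nodup _ (fun r i hr => ?_) _ _ (List.nodup_nil)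
  refine foldl_nodup _ (fun r j hr => ?_) _ _ hr
  split
  · refine foldl_nodup _ (fun r k hr => ?_) _ _ hr
    split
    · next hc =>
        simp only [Bool.and_eq_true, Bool.not_eq_true', List.contains_eq_mem,
          decide_eq_false_iff_not] at hc
        exact List.Nodup.append hr (List.nodup_singleton _)
          (by simpa [List.disjoint_singleton] using hc.2)
    · exact hr
  · exact hr

-- ===== B-side characterisation =====
theorem altDicts_getD1 (l : List (Int × Int)) :
    ∀ (d : PySem.Dict Int (PySem.Set Int) × PySem.Dict Int (PySem.Set Int)) (m b : Int),
      b ∈ (l.foldl (fun sp e =>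
          (sp.1.insert e.1 (PySem.Set.add (sp.1.getD e.1 PySem.Set.empty) e.2),
           sp.2.insert e.2 (PySem.Set.add (sp.2.getD e.2 PySem.Set.empty) e.1))) d).1.getD m PySem.Set.empty ↔
        b ∈ d.1.getD m PySem.Set.empty ∨ ∃ e ∈ l, e.1 = m ∧ e.2 = b := by
  induction l with
  | nil => intro d m b; simp
  | cons e rest ih =>
      intro d m b
      rw [List.foldl_cons, ih, PySem.Dict.getD_insert]
      simp only [List.mem_cons]
      by_cases hm : m = e.1
      · rw [if_pos hm, PySem.Set.mem_add]
        subst hm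
        constructor
        · rintro ((h | rfl) | ⟨f, hf, h1, h2⟩)
          · exact Or.inl h
          · exact Or.inr ⟨e, Or.inl rfl, rfl, rfl⟩
          · exact Or.inr ⟨f, Or.inr hf, h1, h2⟩
        · rintro (h | ⟨f, (rfl | hf), h1, rfl⟩)
          · exact Or.inl (Or.inl h)
          · exact Or.inl (Or.inr rfl)
          · exact Or.inr ⟨f, hf, h1, rfl⟩
      · rw [if_neg hm]
        constructor
        · rintro (h | ⟨f, hf, h1, h2⟩)
          · exact Or.inl h
          · exact Or.inr ⟨f, Or.inr hf, h1, h2⟩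
        · rintro (h | ⟨f, (rfl | hf), h1, h2⟩)
          · exact Or.inl h
          · exact absurd h1 (fun h => hm h.symm)
          · exact Or.inr ⟨f, hf, h1, h2⟩

theorem altDicts_getD2 (l : List (Int × Int)) :
    ∀ (d : PySem.Dict Int (PySem.Set Int) × PySem.Dict Int (PySem.Set Int)) (m a : Int),
      a ∈ (l.foldl (fun sp e =>
          (sp.1.insert e.1 (PySem.Set.add (sp.1.getD e.1 PySem.Set.empty) e.2),
           sp.2.insert e.2 (PySem.Set.add (sp.2.getD e.2 PySem.Set.empty) e.1))) d).2.getD m PySem.Set.empty ↔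
        a ∈ d.2.getD m PySem.Set.empty ∨ ∃ e ∈ l, e.2 = m ∧ e.1 = a := by
  induction l with
  | nil => intro d m a; simp
  | cons e rest ih =>
      intro d m a
      rw [List.foldl_cons, ih, PySem.Dict.getD_insert]
      simp only [List.mem_cons]
      by_cases hm : m = e.2
      · rw [if_pos hm, PySem.Set.mem_add]
        subst hm
        constructor
        · rintro ((h | rfl) | ⟨f, hf, h1, h2⟩)
          · exact Or.inl h
          · exact Or.inr ⟨e, Or.inl rfl, rfl, rfl⟩
          · exact Or.inr ⟨f, Or.inr hf, h1, h2⟩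
        · rintro (h | ⟨f, (rfl | hf), h1, rfl⟩)
          · exact Or.inl (Or.inl h)
          · exact Or.inl (Or.inr rfl)
          · exact Or.inr ⟨f, hf, h1, rfl⟩
      · rw [if_neg hm]
        constructor
        · rintro (h | ⟨f, hf, h1, h2⟩)
          · exact Or.inl h
          · exact Or.inr ⟨f, Or.inr hf, h1, h2⟩
        · rintro (h | ⟨f, (rfl | hf), h1, h2⟩)
          · exact Or.inl h
          · exact absurd h1 (fun h => hm h.symm)
          · exact Or.inr ⟨f, hf, h1, h2⟩

theorem altDicts_keys1 (l : List (Int × Int)) :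
    ∀ (d : PySem.Dict Int (PySem.Set Int) × PySem.Dict Int (PySem.Set Int)) (m : Int),
      m ∈ (l.foldl (fun sp e =>
          (sp.1.insert e.1 (PySem.Set.add (sp.1.getD e.1 PySem.Set.empty) e.2),
           sp.2.insert e.2 (PySem.Set.add (sp.2.getD e.2 PySem.Set.empty) e.1))) d).1.keys ↔
        m ∈ d.1.keys ∨ ∃ e ∈ l, e.1 = m := by
  induction l with
  | nil => intro d m; simp
  | cons e rest ih =>
      intro d m
      simp only [List.foldl_cons, ih, PySem.Dict.mem_keys_insert, List.mem_cons]
      constructor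
      · rintro ((rfl | h) | ⟨f, hf, h1⟩)
        · exact Or.inr ⟨e, Or.inl rfl, rfl⟩
        · exact Or.inl h
        · exact Or.inr ⟨f, Or.inr hf, h1⟩
      · rintro (h | ⟨f, (rfl | hf), rfl⟩)
        · exact Or.inl (Or.inr h)
        · exact Or.inl (Or.inl rfl)
        · exact Or.inr ⟨f, hf, rfl⟩

theorem altDicts_keys2 (l : List (Int × Int)) :
    ∀ (d : PySem.Dict Int (PySem.Set Int) × PySem.Dict Int (PySem.Set Int)) (m : Int),
      m ∈ (l.foldl (fun sp e =>
          (sp.1.insert e.1 (PySem.Set.add (sp.1.getD e.1 PySem.Set.empty) e.2),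
           sp.2.insert e.2 (PySem.Set.add (sp.2.getD e.2 PySem.Set.empty) e.1))) d).2.keys ↔
        m ∈ d.2.keys ∨ ∃ e ∈ l, e.2 = m := by
  induction l with
  | nil => intro d m; simp
  | cons e rest ih =>
      intro d m
      simp only [List.foldl_cons, ih, PySem.Dict.mem_keys_insert, List.mem_cons]
      constructor
      · rintro ((rfl | h) | ⟨f, hf, h1⟩)
        · exact Or.inr ⟨e, Or.inl rfl, rfl⟩
        · exact Or.inl h
        · exact Or.inr ⟨f, Or.inr hf, h1⟩
      · rintro (h | ⟨f, (rfl | hf), rfl⟩)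
        · exact Or.inl (Or.inr h)
        · exact Or.inl (Or.inl rfl)
        · exact Or.inr ⟨f, hf, rfl⟩

theorem memB_inner (a : Int) (out : PySem.Set (Int × Int)) (bs : List Int) (p : Int × Int) :
    p ∈ bs.foldl (fun out b => if a != b then PySem.Set.add out (a, b) else out) out ↔
      p ∈ out ∨ ∃ b ∈ bs, a ≠ b ∧ p = (a, b) := by
  refine foldl_mem_iff _ (fun b => a ≠ b ∧ p = (a, b)) p (fun r b => ?_) bs out
  by_cases h : a = b
  · simp [h]
  · rw [if_pos (by simp [h])]
    rw [PySem.Set.mem_add]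
    constructor
    · rintro (hp | rfl)
      · exact Or.inl hp
      · exact Or.inr ⟨h, rfl⟩
    · rintro (hp | ⟨_, rfl⟩)
      · exact Or.inl hp
      · exact Or.inr rfl

theorem mem_altOut (l : List (Int × Int)) (p : Int × Int) :
    p ∈ altOut l ↔ ∃ j ∈ l, ∃ k ∈ l, k.2 = j.1 ∧ j.2 ≠ k.1 ∧ p = (k.1, j.2) := by
  unfold altOut
  rw [foldl_mem_iff _
      (fun m => (altDicts l).2.contains m = true ∧
        ∃ a ∈ (altDicts l).2.getD m PySem.Set.empty,
          ∃ b ∈ (altDicts l).1.getD m PySem.Set.empty, a ≠ b ∧ p = (a, b)) p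
      (fun out m => by
        by_cases hc : (altDicts l).2.contains m = true
        · rw [if_pos hc]
          rw [foldl_mem_iff _
              (fun a => ∃ b ∈ (altDicts l).1.getD m PySem.Set.empty, a ≠ b ∧ p = (a, b)) p
              (fun out a => memB_inner a out _ p) _ out]
          simp [hc]
        · simp [hc]) ((altDicts l).1.keys) PySem.Set.empty]
  simp only [PySem.Set.empty, List.not_mem_nil, false_or]
  constructor
  · rintro ⟨m, _, hc, a, ha, b, hb, hne, rfl⟩
    obtain ⟨k, hk, hk2, rfl⟩ := ((altDicts_getD2 l _ m a).1 ha).resolve_left (by simp)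
    obtain ⟨j, hj, hj1, rfl⟩ := ((altDicts_getD1 l _ m b).1 hb).resolve_left (by simp)
    exact ⟨j, hj, k, hk, by rw [hk2, hj1], fun h => hne h.symm, rfl⟩
  · rintro ⟨j, hj, k, hk, hkj, hne, rfl⟩
    refine ⟨j.1, ?_, ?_, k.1, ?_, j.2, ?_, fun h => hne h.symm, rfl⟩
    · exact (altDicts_keys1 l _ j.1).2 (Or.inr ⟨j, hj, rfl⟩)
    · exact (PySem.Dict.contains_iff_mem_keys _ _).2
        ((altDicts_keys2 l _ j.1).2 (Or.inr ⟨k, hk, hkj⟩))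
    · exact (altDicts_getD2 l _ j.1 k.1).2 (Or.inr ⟨k, hk, hkj, rfl⟩)
    · exact (altDicts_getD1 l _ j.1 j.2).2 (Or.inr ⟨j, hj, rfl, rfl⟩)

theorem nodup_altOut (l : List (Int × Int)) : (altOut l).Nodup := by
  unfold altOut
  refine foldl_nodup _ (fun r m hr => ?_) _ _ (List.nodup_nil)
  split
  · refine foldl_nodup _ (fun r a hr => ?_) _ _ hr
    refine foldl_nodup _ (fun r b hr => ?_) _ _ hr
    split
    · exact PySem.Set.nodup_add _ _ hr
    · exact hr
  · exact hr

-- ===== sorting: sorted2 of a rearrangement of a Nodup list =====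
def pairLt (a b : Int × Int) : Bool :=
  decide (a.1 < b.1) || (!decide (b.1 < a.1) && decide (a.2 < b.2))

def pairLe (a b : Int × Int) : Prop := pairLt b a = false

theorem pairLt_iff (a b : Int × Int) :
    pairLt a b = true ↔ (a.1 < b.1 ∨ (a.1 = b.1 ∧ a.2 < b.2)) := by
  simp only [pairLt, Bool.or_eq_true, Bool.and_eq_true, Bool.not_eq_true', decide_eq_true_eq,
    decide_eq_false_iff_not]
  omega

theorem pairLt_eq_false_iff (a b : Int × Int) :
    pairLt a b = false ↔ ¬(a.1 < b.1 ∨ (a.1 = b.1 ∧ a.2 < b.2)) := by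
  rw [← pairLt_iff]
  cases pairLt a b <;> simp

theorem pairLt_asymm {a b : Int × Int} (h : pairLt a b = true) : pairLt b a = false := by
  rw [pairLt_iff] at h
  rw [pairLt_eq_false_iff]
  omega

theorem pairLt_trans {a b c : Int × Int} (h1 : pairLt a b = true) (h2 : pairLt b c = true) :
    pairLt a c = true := by
  rw [pairLt_iff] at *
  omega

theorem pairLe_antisymm {a b : Int × Int} (h1 : pairLe a b) (h2 : pairLe b a) : a = b := by
  rw [pairLe, pairLt_eq_false_iff] at h1 h2
  have : a.1 = b.1 ∧ a.2 = b.2 := by omega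
  exact Prod.ext this.1 this.2

theorem pairwise_insertBy (x : Int × Int) :
    ∀ ys : List (Int × Int), ys.Pairwise pairLe →
      (PySem.List.insertBy pairLt x ys).Pairwise pairLe := by
  intro ys
  induction ys with
  | nil => intro _; simp [PySem.List.insertBy, pairLe]
  | cons y t ih =>
      intro h
      rw [List.pairwise_cons] at h
      obtain ⟨hy, ht⟩ := h
      by_cases hxy : pairLt x y = true
      · rw [show PySem.List.insertBy pairLt x (y :: t) = x :: y :: t by
          simp [PySem.List.insertBy, hxy]]
        refine List.Pairwise.cons ?_ (List.Pairwise.cons hy ht)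
        intro z hz
        rcases List.mem_cons.1 hz with rfl | hz
        · exact pairLt_asymm hxy
        · -- pairLe x z : pairLt z x = false
          rw [pairLe]
          by_contra hc
          have hzx : pairLt z x = true := by
            cases h : pairLt z x
            · exact absurd h hc
            · rfl
          have : pairLt z y = true := pairLt_trans hzx hxy
          exact absurd (hy z hz) (by simp [pairLe, this])
      · rw [show PySem.List.insertBy pairLt x (y :: t) = y :: PySem.List.insertBy pairLt x t by
          simp [PySem.List.insertBy, hxy]]
        refine List.Pairwise.cons ?_ (ih ht)
        intro z hz
        rw [PySem.List.mem_insertBy] at hz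
        rcases hz with rfl | hz
        · rw [pairLe]
          exact Bool.eq_false_iff.mpr hxy
        · exact hy z hz

theorem pairwise_sorted2 (xs : List (Int × Int)) :
    (PySem.List.sorted2 xs Prod.fst Prod.snd).Pairwise pairLe := by
  have key : ∀ (ys : List (Int × Int)) (acc : List (Int × Int)), acc.Pairwise pairLe →
      (ys.foldl (fun acc x => PySem.List.insertBy pairLt x acc) acc).Pairwise pairLe := by
    intro ys
    induction ys with
    | nil => intro acc h; simpa
    | cons y t ih => intro acc h; exact ih _ (pairwise_insertBy y acc h)
  exact key xs [] (List.Pairwise.nil)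

theorem sorted2_eq_of_perm {xs ys : List (Int × Int)} (h : xs.Perm ys) :
    PySem.List.sorted2 xs Prod.fst Prod.snd = PySem.List.sorted2 ys Prod.fst Prod.snd := by
  refine List.Perm.eq_of_pairwise (fun a b _ _ hab hba => pairLe_antisymm hab hba)
    (pairwise_sorted2 xs) (pairwise_sorted2 ys) ?_
  exact ((PySem.List.sorted2_perm xs _ _ _).trans h).trans (PySem.List.sorted2_perm ys _ _ _).symm

-- ===== VERDICT (by name: the statement is the Claim_ definition above) =====
theorem onehop_spec : Claim_equal_onehop := by
  intro l _
  unfold Spec_onehop onehop onehop_alt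
  exact sorted2_eq_of_perm <|
    (List.perm_ext_iff_of_nodup (nodup_onehopR l) (nodup_altOut l)).2
      (fun p => (mem_onehopR l p).trans (mem_altOut l p).symm)
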